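-- pv_equiv track=rewrite | github.com/lcwllmr/kop2024 | src/kop2024/helpers.py | monomial_exponents
-- ===== SOURCE A (Python) =====
-- import itertools
--
-- def monomial_exponents(n: int, d: int) -> list[tuple[int]]:
--     """
--     Generate a list of all monomials in n variables of degree exactly d.
--     """
--
--     if n > 1:
--         # use the "stars and bars" method
--         out = []
--         for c in itertools.combinations(range(d + n - 1), n - 1):
--             # compute the n-tuple for which that assigns an exponent to each variable
--             indicator = tuple(
--                 [c[0]]
--                 + [c[i + 1] - c[i] - 1 for i in range(n - 2)]
--                 + [d + n - 2 - c[-1]]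
--             )
--
--             # save each appearing variable with its index according to its multiplicity
--             variables = []
--             for i, a in enumerate(indicator):
--                 if a != 0:
--                     variables.extend(a * [i])
--             out.append(tuple(variables))
--         return out
--     else:
--         # for n=1 there is exactly one exponent
--         return [tuple(d * [0])]
-- ===== SOURCE B (Python) =====
-- import itertools
--
-- def monomial_exponents(n: int, d: int) -> list[tuple[int]]:
--     """
--     Generate a list of all monomials in n variables of degree exactly d.
--     """
--     if n > 1:
--         if d < 0:
--             return []
--         return list(reversed(list(itertools.combinations_with_replacement(range(n), d))))
--     else:
--         return [tuple(d * [0])]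
-- ===== Notes on version B (the rewrite author's own statement) =====
-- stated objective: simpler
-- what changed: Replaces the stars-and-bars pipeline (combinations of bar positions, indicator vector, exponent expansion) with a direct reversed enumeration of size-d multisets via itertools.combinations_with_replacement.
import Mathlib
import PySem

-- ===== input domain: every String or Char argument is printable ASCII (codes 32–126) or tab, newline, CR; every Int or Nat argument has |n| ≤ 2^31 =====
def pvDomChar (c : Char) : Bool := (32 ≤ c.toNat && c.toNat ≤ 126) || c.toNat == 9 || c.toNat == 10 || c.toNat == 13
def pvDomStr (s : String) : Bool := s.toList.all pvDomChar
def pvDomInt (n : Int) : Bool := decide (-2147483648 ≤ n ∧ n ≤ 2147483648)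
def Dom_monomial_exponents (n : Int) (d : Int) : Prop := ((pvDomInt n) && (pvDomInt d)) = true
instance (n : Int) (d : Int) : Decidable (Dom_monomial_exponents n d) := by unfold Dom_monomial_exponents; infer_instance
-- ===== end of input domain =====

-- B replaces A's stars-and-bars pipeline by directly enumerating the size-d multisets
-- (combinations with replacement) in reverse; equivalence of the return values is proved.

-- ===== PORT A =====
-- range(m) (as used: range(d+n-1)); pvRng a b = [a, a+1, ..., b-1]
def pvRng (a b : Int) : List Int := (List.range (b - a).toNat).map (fun (i : Nat) => a + (i : Int))

-- itertools.combinations(pool, k) in itertools' lexicographic emission order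
-- (including itertools' immediate 'r > len(pool)' empty result, which keeps evaluation fast)
def pvCombos : List Int → Nat → List (List Int)
  | _, 0 => [[]]
  | [], _ + 1 => []
  | x :: xs, k + 1 =>
      if xs.length + 1 < k + 1 then []
      else ((pvCombos xs k).map (fun c => x :: c)) ++ pvCombos xs (k + 1)

def monomial_exponents (n : Int) (d : Int) : List (List Int) :=
  if n > 1 then
    (pvCombos (pvRng 0 (d + n - 1)) (n - 1).toNat).map (fun c =>
      -- c[0], c[i+1], c[i], c[-1] are always in range (len(c) = n-1 ≥ 1), so the
      -- getD/headD/getLastD defaults are never consulted and the port is exact.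
      let indicator : List Int :=
        [c.headD 0]
          ++ (List.range (n - 2).toNat).map (fun i => c.getD (i + 1) 0 - c.getD i 0 - 1)
          ++ [d + n - 2 - c.getLastD 0]
      (PySem.List.enumerate indicator 0).foldl
        (fun acc p => if p.2 ≠ 0 then acc ++ PySem.List.pyRepeat [p.1] p.2 else acc) [])
  else [PySem.List.pyRepeat [(0 : Int)] d]

-- ===== PORT B =====
-- itertools.combinations_with_replacement(pool, k) in lexicographic emission order
def pvCwr : List Int → Nat → List (List Int)
  | _, 0 => [[]]
  | [], _ + 1 => []
  | x :: xs, k + 1 => ((pvCwr (x :: xs) k).map (fun t => x :: t)) ++ pvCwr xs (k + 1)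
termination_by pool k => pool.length + k

def monomial_exponents_alt (n : Int) (d : Int) : List (List Int) :=
  if n > 1 then
    if d < 0 then []
    else (pvCwr (pvRng 0 n) d.toNat).reverse
  else [PySem.List.pyRepeat [(0 : Int)] d]

-- ===== PRECONDITION & SPEC =====
def Spec_monomial_exponents (n : Int) (d : Int) (out : List (List Int)) : Prop := out = monomial_exponents_alt n d
instance (n : Int) (d : Int) (out : List (List Int)) : Decidable (Spec_monomial_exponents n d out) := by unfold Spec_monomial_exponents; infer_instance

-- ===== CLAIM (what is proved, stated in full; the proofs are below) =====
def Claim_equal_monomial_exponents : Prop := ∀ (n : Int) (d : Int), Dom_monomial_exponents n d → Spec_monomial_exponents n d (monomial_exponents n d)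

-- ===== LEMMAS AND PROOFS =====

-- the common value: monomials of m variables, degree e, in the shared order
def pvR : Nat → Nat → List (List Int)
  | 0, e => [List.replicate e 0]
  | 1, e => [List.replicate e 0]
  | _ + 2, 0 => [[]]
  | m + 2, e + 1 =>
      ((pvR (m + 1) (e + 1)).map (List.map (· + 1))) ++ ((pvR (m + 2) e).map (fun t => 0 :: t))
termination_by m e => m + e

-- variables list of a bar configuration c with virtual left bar `prev`, next variable `i`, right bound D
def pvGoV (D : Int) : Int → Int → List Int → List Int
  | prev, i, [] => List.replicate (D - prev).toNat i
  | prev, i, x :: rest => List.replicate (x - prev - 1).toNat i ++ pvGoV D x (i + 1) rest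

-- the indicator list, recursively
def pvIndFrom (D : Int) : Int → List Int → List Int
  | prev, [] => [D - prev]
  | prev, x :: rest => (x - prev - 1) :: pvIndFrom D x rest

theorem pvRng_cons (a b : Int) (h : a < b) : pvRng a b = a :: pvRng (a + 1) b := by
  have hm : (b - a).toNat = (b - (a + 1)).toNat + 1 := by omega
  simp only [pvRng, hm, List.range_succ_eq_map, List.map_cons, List.map_map]
  refine congrArg₂ (· :: ·) (by simp) (List.map_congr_left fun i _ => ?_)
  simp only [Function.comp_apply]; push_cast; ring
theorem pvRng_shift (a b : Int) : pvRng (a + 1) (b + 1) = (pvRng a b).map (· + 1) := by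
  have hm : (b + 1 - (a + 1)).toNat = (b - a).toNat := by omega
  simp only [pvRng, hm, List.map_map]
  exact List.map_congr_left fun i _ => by simp only [Function.comp_apply]; ring
theorem pvRng_length (a b : Int) : (pvRng a b).length = (b - a).toNat := by
  simp [pvRng]
theorem pvRng_zero_succ (m : Nat) : pvRng 0 ((m : Int) + 1) = 0 :: (pvRng 0 (m : Int)).map (· + 1) := by
  rw [pvRng_cons 0 ((m : Int) + 1) (by omega)]
  have : (0 : Int) + 1 = 0 + 1 := rfl
  rw [show ((m : Int) + 1) = (m : Int) + 1 from rfl, show (0 : Int) + 1 = (0 : Int) + 1 from rfl,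
    pvRng_shift 0 (m : Int)]
theorem pvRng_mem_nonneg (m : Int) (x : Int) (h : x ∈ pvRng 0 m) : 0 ≤ x := by
  simp only [pvRng, List.mem_map, List.mem_range] at h
  obtain ⟨i, _, rfl⟩ := h; omega

theorem pvCombos_zero (pool : List Int) : pvCombos pool 0 = [[]] := by
  cases pool <;> rfl

theorem pvCombos_nil' (pool : List Int) (k : Nat) (h : pool.length < k) : pvCombos pool k = [] := by
  cases pool with
  | nil => cases k with
    | zero => simp at h
    | succ k => rfl
  | cons x xs =>
    cases k with
    | zero => simp at h
    | succ k =>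
      rw [pvCombos, if_pos (by simpa using h)]

-- the guard never changes the value: the unguarded recursion equation always holds
theorem pvCombos_cons (x : Int) (xs : List Int) (k : Nat) :
    pvCombos (x :: xs) (k + 1) = ((pvCombos xs k).map (fun c => x :: c)) ++ pvCombos xs (k + 1) := by
  by_cases h : xs.length + 1 < k + 1
  · rw [pvCombos, if_pos h, pvCombos_nil' xs k (by omega), pvCombos_nil' xs (k + 1) (by omega)]
    simp
  · rw [pvCombos, if_neg h]

theorem pvCombos_shift (pool : List Int) (k : Nat) :
    pvCombos (pool.map (· + 1)) k = (pvCombos pool k).map (List.map (· + 1)) := by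
  induction pool generalizing k with
  | nil => cases k <;> simp [pvCombos]
  | cons x xs ih =>
    cases k with
    | zero => simp [pvCombos]
    | succ k =>
      rw [show (x :: xs).map (· + 1) = (x + 1) :: xs.map (· + 1) from rfl,
        pvCombos_cons, pvCombos_cons, ih, ih, List.map_map]
      simp [Function.comp_def]
theorem pvCwr_shift (pool : List Int) (k : Nat) :
    pvCwr (pool.map (· + 1)) k = (pvCwr pool k).map (List.map (· + 1)) := by
  induction hn : pool.length + k using Nat.strong_induction_on generalizing pool k with
  | _ n ih =>
    match pool, k with
    | _, 0 => simp [pvCwr]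
    | [], _ + 1 => simp [pvCwr]
    | x :: xs, k + 1 =>
      subst hn
      rw [show (x :: xs).map (· + 1) = (x + 1) :: xs.map (· + 1) from rfl]
      rw [pvCwr, pvCwr]
      rw [show ((x + 1) :: xs.map (· + 1)) = (x :: xs).map (· + 1) from rfl]
      rw [ih _ (by simp only [List.length_cons]; omega) (x :: xs) k rfl, ih _ (by simp only [List.length_cons]; omega) xs (k + 1) rfl]
      simp [List.map_map, Function.comp_def]
theorem pvCombos_length (pool : List Int) (k : Nat) (c : List Int) (h : c ∈ pvCombos pool k) :
    c.length = k := by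
  induction pool generalizing k c with
  | nil => cases k with
    | zero => simp [pvCombos] at h; simp [h]
    | succ k => simp [pvCombos] at h
  | cons x xs ih =>
    cases k with
    | zero => simp [pvCombos] at h; simp [h]
    | succ k =>
      rw [pvCombos_cons] at h
      simp only [List.mem_append, List.mem_map] at h
      rcases h with ⟨c', hc', rfl⟩ | h
      · simp [ih k c' hc']
      · exact ih (k + 1) c h
theorem pvCombos_mem (pool : List Int) (k : Nat) (c : List Int) (h : c ∈ pvCombos pool k)
    (x : Int) (hx : x ∈ c) : x ∈ pool := by
  induction pool generalizing k c with
  | nil => cases k with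
    | zero => simp [pvCombos] at h; subst h; simp at hx
    | succ k => simp [pvCombos] at h
  | cons y ys ih =>
    cases k with
    | zero => simp [pvCombos] at h; subst h; simp at hx
    | succ k =>
      rw [pvCombos_cons] at h
      simp only [List.mem_append, List.mem_map] at h
      rcases h with ⟨c', hc', rfl⟩ | h
      · rcases List.mem_cons.mp hx with rfl | hx'
        · exact List.mem_cons_self
        · exact List.mem_cons_of_mem _ (ih k c' hc' hx')
      · exact List.mem_cons_of_mem _ (ih (k + 1) c h hx)
theorem pvCombos_nil (pool : List Int) (k : Nat) (h : pool.length < k) : pvCombos pool k = [] :=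
  pvCombos_nil' pool k h
theorem pvCombos_full (pool : List Int) : pvCombos pool pool.length = [pool] := by
  induction pool with
  | nil => simp [pvCombos]
  | cons x xs ih =>
    rw [List.length_cons, pvCombos_cons, ih, pvCombos_nil xs (xs.length + 1) (by omega)]
    simp
theorem pvCwr_single (x : Int) (e : Nat) : pvCwr [x] e = [List.replicate e x] := by
  induction e with
  | zero => simp [pvCwr]
  | succ e ih => simp [pvCwr, ih, List.replicate_succ]

theorem pvFoldl_rep (l : List (Int × Int)) (acc : List Int) :
    l.foldl (fun acc p => if p.2 ≠ 0 then acc ++ PySem.List.pyRepeat [p.1] p.2 else acc) acc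
      = acc ++ l.flatMap (fun p => List.replicate p.2.toNat p.1) := by
  induction l generalizing acc with
  | nil => simp
  | cons p rest ih =>
    rw [List.foldl_cons, ih]
    by_cases hp : p.2 = 0
    · simp [hp]
    · simp [hp, PySem.List.pyRepeat_singleton]

theorem pvInd_eq (D : Int) (k : Nat) :
    ∀ (c : List Int) (prev : Int), c.length = k + 1 →
      (c.headD 0 - prev - 1)
          :: ((List.range k).map (fun i => c.getD (i + 1) 0 - c.getD i 0 - 1) ++ [D - c.getLastD 0])
        = pvIndFrom D prev c := by
  induction k with
  | zero =>
    rintro (_ | ⟨x, (_ | _)⟩) prev h <;> simp_all [pvIndFrom]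
  | succ k ih =>
    rintro (_ | ⟨x, rest⟩) prev h
    · simp at h
    · have hr : rest.length = k + 1 := by simpa using h
      obtain ⟨y, rest', rfl⟩ : ∃ y rest', rest = y :: rest' := by
        cases rest with
        | nil => simp at hr
        | cons y rest' => exact ⟨y, rest', rfl⟩
      have hmap : (List.range (k + 1)).map
            (fun i => (x :: y :: rest').getD (i + 1) 0 - (x :: y :: rest').getD i 0 - 1)
          = (y - x - 1) :: (List.range k).map
            (fun i => (y :: rest').getD (i + 1) 0 - (y :: rest').getD i 0 - 1) := by
        rw [List.range_succ_eq_map, List.map_cons, List.map_map]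
        refine congrArg₂ (· :: ·) (by simp) ?_
        exact List.map_congr_left fun i _ => by simp [Function.comp]
      rw [pvIndFrom, ← ih (y :: rest') x hr]
      simp only [List.headD_cons]
      refine congrArg₂ (· :: ·) rfl ?_
      rw [show (x :: y :: rest').getLastD 0 = (y :: rest').getLastD 0 from by simp]
      rw [hmap, List.cons_append]

theorem pvEnum_ind (D : Int) (c : List Int) : ∀ (prev i : Int),
    (PySem.List.enumerate (pvIndFrom D prev c) i).flatMap (fun p => List.replicate p.2.toNat p.1)
      = pvGoV D prev i c := by
  induction c with
  | nil => intro prev i; simp [pvIndFrom, pvGoV, PySem.List.enumerate_cons, PySem.List.enumerate_nil]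
  | cons x rest ih =>
    intro prev i
    simp only [pvIndFrom, pvGoV, PySem.List.enumerate_cons, List.flatMap_cons, ih]

theorem pvGoV_shift (D : Int) (c : List Int) : ∀ (prev i : Int),
    pvGoV (D + 1) (prev + 1) i (c.map (· + 1)) = pvGoV D prev i c := by
  induction c with
  | nil => intro prev i; simp only [List.map_nil, pvGoV]; congr 1; omega
  | cons x rest ih =>
    intro prev i
    simp only [List.map_cons, pvGoV, ih]
    congr 2
    omega
theorem pvGoV_idx (D : Int) (c : List Int) : ∀ (prev i : Int),
    pvGoV D prev (i + 1) c = (pvGoV D prev i c).map (· + 1) := by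
  induction c with
  | nil => intro prev i; simp [pvGoV, List.map_replicate]
  | cons x rest ih =>
    intro prev i
    simp [pvGoV, ih, List.map_replicate]
theorem pvGoV_consec (D : Int) : ∀ (x i : Int), x ≤ D → pvGoV D x i (pvRng (x + 1) (D + 1)) = [] := by
  suffices H : ∀ (t : Nat) (x i : Int), x ≤ D → (D - x).toNat = t → pvGoV D x i (pvRng (x + 1) (D + 1)) = [] by
    intro x i hx; exact H (D - x).toNat x i hx rfl
  intro t
  induction t with
  | zero =>
    intro x i hx ht
    have hx' : x = D := by omega
    subst hx'
    have : pvRng (x + 1) (x + 1) = [] := by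
      simp [pvRng]
    rw [this]
    simp [pvGoV]
  | succ t ih =>
    intro x i hx ht
    have hlt : x + 1 < D + 1 := by omega
    rw [pvRng_cons _ _ hlt, pvGoV]
    have : (x + 1 - x - 1).toNat = 0 := by omega
    rw [this, ih (x + 1) (i + 1) (by omega) (by omega)]
    simp
theorem pvGoV_cons0 (D : Int) (c : List Int) (hne : c ≠ []) (hh : 0 ≤ c.headD 0) :
    pvGoV D (-1) 0 (c.map (· + 1)) = 0 :: pvGoV (D - 1) (-1) 0 c := by
  obtain ⟨y, rest, rfl⟩ : ∃ y rest, c = y :: rest := by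
    cases c with
    | nil => exact absurd rfl hne
    | cons y rest => exact ⟨y, rest, rfl⟩
  simp only [List.headD_cons] at hh
  simp only [List.map_cons, pvGoV]
  have h1 : pvGoV D (y + 1) (0 + 1) (rest.map (· + 1)) = pvGoV (D - 1) y (0 + 1) rest := by
    have := pvGoV_shift (D - 1) rest y (0 + 1)
    simpa using this
  rw [h1]
  have h2 : (y + 1 - -1 - 1).toNat = (y - -1 - 1).toNat + 1 := by omega
  rw [h2, List.replicate_succ]
  simp

-- group-2 step: prepending a bar at position 0 prepends variable 0
theorem pvStep2 (D : Int) (pool : List Int) (k : Nat)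
    (hpool : ∀ x ∈ pool, 0 ≤ x) :
    (pvCombos (pool.map (· + 1)) (k + 1)).map (fun c => pvGoV D (-1) 0 c)
      = (pvCombos pool (k + 1)).map (fun c => 0 :: pvGoV (D - 1) (-1) 0 c) := by
  rw [pvCombos_shift, List.map_map]
  refine List.map_congr_left fun c hc => ?_
  have hlen : c.length = k + 1 := pvCombos_length pool (k + 1) c hc
  have hne : c ≠ [] := by intro h; rw [h] at hlen; simp at hlen
  have hh : 0 ≤ c.headD 0 := by
    obtain ⟨w, rest, rfl⟩ : ∃ w rest, c = w :: rest := by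
      cases c with
      | nil => exact absurd rfl hne
      | cons w rest => exact ⟨w, rest, rfl⟩
    exact hpool w (pvCombos_mem pool (k + 1) _ hc w List.mem_cons_self)
  exact pvGoV_cons0 D c hne hh

-- group-1 step: a bar at 0 means variable 0 is absent, shifting all variables up
theorem pvStep1 (D : Int) (pool : List Int) (k : Nat) :
    (pvCombos (pool.map (· + 1)) k).map (fun c => pvGoV D (-1) 0 (0 :: c))
      = ((pvCombos pool k).map (fun c => pvGoV (D - 1) (-1) 0 c)).map (List.map (· + 1)) := by
  rw [pvCombos_shift, List.map_map, List.map_map]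
  refine List.map_congr_left fun c _ => ?_
  show pvGoV D (-1) 0 (0 :: c.map (· + 1)) = (pvGoV (D - 1) (-1) 0 c).map (· + 1)
  simp only [pvGoV]
  rw [show ((0 : Int) - (-1) - 1).toNat = 0 by norm_num, List.replicate_zero, List.nil_append]
  rw [pvGoV_idx]
  have h := pvGoV_shift (D - 1) c (-1) 0
  rw [show (D - 1) + 1 = D by ring, show (-1 : Int) + 1 = 0 by ring] at h
  rw [h]

theorem pvMainA (d k : Nat) :
    (pvCombos (pvRng 0 ((d : Int) + (k : Int) + 1)) (k + 1)).map (fun c => pvGoV ((d : Int) + (k : Int)) (-1) 0 c)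
      = pvR (k + 2) d := by
  induction d generalizing k with
  | zero =>
    have hlen : (pvRng 0 ((0 : Nat) + (k : Int) + 1)).length = k + 1 := by
      rw [pvRng_length]; omega
    rw [← hlen, pvCombos_full]
    have : pvGoV ((0 : Nat) + (k : Int)) (-1) 0 (pvRng 0 ((0 : Nat) + (k : Int) + 1)) = [] := by
      have h := pvGoV_consec ((k : Int)) (-1) 0 (by omega)
      rw [show (-1 : Int) + 1 = 0 by ring] at h
      rw [show ((0 : Nat) + (k : Int)) = (k : Int) by push_cast; ring]
      exact h
    rw [List.map_singleton, this, pvR]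
  | succ e ihd =>
    induction k with
    | zero =>
      have hsplit := pvRng_zero_succ (e + 1)
      push_cast
      push_cast at hsplit
      rw [show (e : Int) + 1 + 0 = (e : Int) + 1 by ring]
      rw [hsplit, pvCombos_cons, List.map_append, List.map_map]
      have hg1 : (pvCombos ((pvRng 0 ((e : Int) + 1)).map (· + 1)) 0).map
            ((fun c => pvGoV ((e : Int) + 1) (-1) 0 c) ∘ (fun c => 0 :: c))
          = [List.replicate (e + 1) 1] := by
        rw [pvCombos_zero]
        simp only [List.map_singleton, Function.comp_apply]
        simp only [pvGoV]
        rw [show ((0 : Int) - (-1) - 1).toNat = 0 by norm_num,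
          show ((e : Int) + 1 - 0).toNat = e + 1 by omega]
        simp
      have hg2 : (pvCombos ((pvRng 0 ((e : Int) + 1)).map (· + 1)) 1).map
            (fun c => pvGoV ((e : Int) + 1) (-1) 0 c)
          = (pvR 2 e).map (fun t => 0 :: t) := by
        rw [pvStep2 ((e : Int) + 1) (pvRng 0 ((e : Int) + 1)) 0
          (fun x hx => pvRng_mem_nonneg _ x hx)]
        rw [show (e : Int) + 1 - 1 = (e : Int) by ring]
        have h := ihd 0
        push_cast at h
        rw [← h, List.map_map]
        rfl
      rw [hg1, hg2]
      conv_rhs => rw [pvR]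
      rw [show pvR 1 (e + 1) = [List.replicate (e + 1) 0] from by rw [pvR]]
      simp [List.map_replicate]
    | succ m ihk =>
      have hsplit := pvRng_zero_succ (e + 1 + m + 1)
      push_cast
      push_cast at hsplit
      push_cast at ihk
      -- D = ↑e + 1 + ↑m + 1
      rw [show (e : Int) + 1 + (↑m + 1) = (e : Int) + 1 + ↑m + 1 by ring]
      rw [hsplit, pvCombos_cons, List.map_append, List.map_map, Function.comp_def]
      have hg1 : (pvCombos ((pvRng 0 ((e : Int) + 1 + ↑m + 1)).map (· + 1)) (m + 1)).map
            (fun c => pvGoV ((e : Int) + 1 + ↑m + 1) (-1) 0 (0 :: c))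
          = (pvR (m + 2) (e + 1)).map (List.map (· + 1)) := by
        rw [pvStep1 ((e : Int) + 1 + ↑m + 1) (pvRng 0 ((e : Int) + 1 + ↑m + 1)) (m + 1)]
        rw [show (e : Int) + 1 + ↑m + 1 - 1 = (e : Int) + 1 + ↑m by ring]
        rw [ihk]
      have hg2 : (pvCombos ((pvRng 0 ((e : Int) + 1 + ↑m + 1)).map (· + 1)) (m + 1 + 1)).map
            (fun c => pvGoV ((e : Int) + 1 + ↑m + 1) (-1) 0 c)
          = (pvR (m + 1 + 2) e).map (fun t => 0 :: t) := by
        rw [pvStep2 ((e : Int) + 1 + ↑m + 1) (pvRng 0 ((e : Int) + 1 + ↑m + 1)) (m + 1)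
          (fun x hx => pvRng_mem_nonneg _ x hx)]
        rw [show (e : Int) + 1 + ↑m + 1 - 1 = (e : Int) + (↑m + 1) by ring]
        have h := ihd (m + 1)
        push_cast at h
        rw [show (e : Int) + (↑m + 1) + 1 = (e : Int) + 1 + ↑m + 1 by ring] at h
        rw [← h, List.map_map, Function.comp_def]
      rw [hg1, hg2]
      conv_rhs => rw [pvR]

theorem pvRng_one : pvRng 0 (1 : Int) = [0] := by
  simp [pvRng]

theorem pvMainB (m d : Nat) :
    (pvCwr (pvRng 0 ((m : Int) + 1)) d).reverse = pvR (m + 1) d := by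
  induction m generalizing d with
  | zero =>
    rw [show ((0 : Nat) : Int) + 1 = (1 : Int) by norm_num, pvRng_one, pvCwr_single]
    simp [pvR]
  | succ m ihm =>
    induction d with
    | zero => simp [pvCwr, pvR]
    | succ e ihd =>
      rw [pvRng_zero_succ (m + 1), pvCwr, List.reverse_append, pvCwr_shift,
        ← List.map_reverse, ← List.map_reverse]
      have h1 : (pvCwr (pvRng 0 ((m + 1 : Nat) : Int)) (e + 1)).reverse = pvR (m + 1) (e + 1) := by
        have h := ihm (e + 1)
        rw [show ((m : Int) + 1) = ((m + 1 : Nat) : Int) by push_cast; ring] at h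
        exact h
      have h2 : (pvCwr (0 :: (pvRng 0 ((m + 1 : Nat) : Int)).map (· + 1)) e).reverse
          = pvR (m + 2) e := by
        rw [← pvRng_zero_succ (m + 1)]; exact ihd
      rw [h1, h2, pvR]

-- ===== VERDICT (by name: the statement is the Claim_ definition above) =====
theorem monomial_exponents_spec : Claim_equal_monomial_exponents := by
  intro n d _
  show monomial_exponents n d = monomial_exponents_alt n d
  rw [monomial_exponents, monomial_exponents_alt]
  by_cases hn : n > 1
  · rw [if_pos hn, if_pos hn]
    by_cases hd : d < 0
    · rw [if_pos hd, pvCombos_nil _ _ (by rw [pvRng_length]; omega)]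
      rfl
    · rw [if_neg hd]
      have hk : ((n - 2).toNat : Int) = n - 2 := by omega
      have h1 : (n - 1).toNat = (n - 2).toNat + 1 := by omega
      have h2 : d + n - 1 = (d.toNat : Int) + ((n - 2).toNat : Int) + 1 := by omega
      have h3 : d + n - 2 = (d.toNat : Int) + ((n - 2).toNat : Int) := by omega
      rw [h1, h2]
      have hA : (pvCombos (pvRng 0 ((d.toNat : Int) + ((n - 2).toNat : Int) + 1)) ((n - 2).toNat + 1)).map
            (fun c =>
              let indicator : List Int :=
                [c.headD 0]
                  ++ (List.range (n - 2).toNat).map (fun i => c.getD (i + 1) 0 - c.getD i 0 - 1)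
                  ++ [d + n - 2 - c.getLastD 0]
              (PySem.List.enumerate indicator 0).foldl
                (fun acc p => if p.2 ≠ 0 then acc ++ PySem.List.pyRepeat [p.1] p.2 else acc) [])
          = pvR ((n - 2).toNat + 2) d.toNat := by
        rw [← pvMainA d.toNat (n - 2).toNat]
        refine List.map_congr_left fun c hc => ?_
        have hlen : c.length = (n - 2).toNat + 1 := pvCombos_length _ _ c hc
        show (PySem.List.enumerate
            ([c.headD 0]
              ++ (List.range (n - 2).toNat).map (fun i => c.getD (i + 1) 0 - c.getD i 0 - 1)
              ++ [d + n - 2 - c.getLastD 0]) 0).foldl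
            (fun acc p => if p.2 ≠ 0 then acc ++ PySem.List.pyRepeat [p.1] p.2 else acc) []
          = pvGoV ((d.toNat : Int) + ((n - 2).toNat : Int)) (-1) 0 c
        rw [pvFoldl_rep, List.nil_append, h3]
        have hind := pvInd_eq ((d.toNat : Int) + ((n - 2).toNat : Int)) (n - 2).toNat c (-1) hlen
        rw [show c.headD 0 - (-1) - 1 = c.headD 0 by ring] at hind
        rw [List.singleton_append, List.cons_append, hind]
        exact pvEnum_ind _ c (-1) 0
      rw [hA]
      have hB := pvMainB ((n - 2).toNat + 1) d.toNat
      rw [show (((n - 2).toNat + 1 : Nat) : Int) + 1 = n by omega] at hB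
      rw [hB]
  · rw [if_neg hn, if_neg hn]
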